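-- pv_equiv track=rewrite | github.com/pypi-data/pypi-mirror-217 | packages/nitrogfx-py/nitrogfx-py-0.2.0.tar.gz/nitrogfx-py-0.2.0/src/nitrogfx/ncgr.py | flip_tile
-- ===== SOURCE A (Python) =====
-- def flip_tile(tile, xflip : bool, yflip : bool):
--     """Flips a tile horizontally and/or vertically
--     :param tile: a tile
--     :param xflip: flip horizontally?
--     :param yflip: flip vertically?
--     :return: flipped tile
--     """
--     if xflip and yflip:
--         return [tile[8*y+x] for y in range(7,-1,-1) for x in range(7,-1,-1)]
--     elif yflip:
--         return [tile[8*y+x] for y in range(7,-1,-1) for x in range(8)]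
--     elif xflip:
--         return [tile[8*y+x] for y in range(8) for x in range(7,-1,-1)]
--     return tile
-- ===== SOURCE B (Python) =====
-- def flip_tile(tile, xflip: bool, yflip: bool):
--     """Flips a tile horizontally and/or vertically.
--
--     Staged re-implementation: consume the tile into its 8 rows of 8, reverse the
--     row list for a vertical flip, reverse each row for a horizontal flip, flatten.
--     """
--     if not (xflip or yflip):
--         return tile
--     it = iter(tile)
--     rows = [[next(it) for _ in range(8)] for _ in range(8)]
--     if yflip:
--         rows.reverse()
--     if xflip:
--         rows = [row[::-1] for row in rows]
--     return [p for row in rows for p in row]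
-- ===== Notes on version B (the rewrite author's own statement) =====
-- stated objective: alternative
-- what changed: B decomposes the tile into its 8 rows (consuming the input iterator 8 elements at a time) and applies the flips as staged list operations (reverse the row list for yflip, reverse each row for xflip, then flatten), instead of A's four fixed-range index comprehensions that read tile[8*y+x] element by element.
import Mathlib
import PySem

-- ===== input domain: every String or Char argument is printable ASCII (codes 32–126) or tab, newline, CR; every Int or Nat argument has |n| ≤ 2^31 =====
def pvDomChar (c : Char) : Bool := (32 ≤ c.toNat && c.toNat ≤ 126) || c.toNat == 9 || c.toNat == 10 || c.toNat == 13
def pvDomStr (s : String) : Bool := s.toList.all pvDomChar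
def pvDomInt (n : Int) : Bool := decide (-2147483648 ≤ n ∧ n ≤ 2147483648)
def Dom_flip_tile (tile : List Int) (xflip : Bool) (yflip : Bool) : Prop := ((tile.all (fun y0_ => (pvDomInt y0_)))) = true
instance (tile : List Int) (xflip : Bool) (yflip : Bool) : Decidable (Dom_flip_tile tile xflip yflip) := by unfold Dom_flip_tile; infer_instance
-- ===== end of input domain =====

-- B computes the flips in stages on a row decomposition (consume the tile into its
-- 8 rows of 8, reverse the row list for yflip, reverse each row for xflip, flatten)
-- instead of A's four fixed-range index comprehensions (objective: alternative).

-- ===== PORT A =====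
def flip_tile (tile : List Int) (xflip : Bool) (yflip : Bool) : List Int :=
  if xflip && yflip then
    (PySem.List.pyRange 7 (-1) (-1)).flatMap (fun y =>
      (PySem.List.pyRange 7 (-1) (-1)).map (fun x => PySem.List.pyGetD tile (8*y+x) 0))
  else if yflip then
    (PySem.List.pyRange 7 (-1) (-1)).flatMap (fun y =>
      (PySem.List.pyRange 0 8 1).map (fun x => PySem.List.pyGetD tile (8*y+x) 0))
  else if xflip then
    (PySem.List.pyRange 0 8 1).flatMap (fun y =>
      (PySem.List.pyRange 7 (-1) (-1)).map (fun x => PySem.List.pyGetD tile (8*y+x) 0))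
  else tile

-- ===== PORT B =====
def flip_tile_alt (tile : List Int) (xflip : Bool) (yflip : Bool) : List Int :=
  if !(xflip || yflip) then tile
  else
    -- [[next(it) for _ in range(8)] for _ in range(8)]: each step takes the next
    -- 8 elements of the remaining input (exact where Python B returns; where the
    -- iterator would be exhausted Python B raises, which is outside Pre_).
    let rows := (((List.range 8).foldl (fun (st : List (List Int) × List Int) _ =>
      (st.1 ++ [st.2.take 8], st.2.drop 8)) ([], tile)).1)
    let rows := if yflip then rows.reverse else rows
    let rows := if xflip then rows.map List.reverse else rows
    rows.flatMap id

-- ===== PRECONDITION & SPEC =====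
-- Pre_ excludes exactly the inputs where A raises IndexError: a flip requested on a
-- tile with fewer than 64 entries (indices 0..63 are read).
def Pre_flip_tile (tile : List Int) (xflip : Bool) (yflip : Bool) : Prop :=
  (xflip = true ∨ yflip = true) → 64 ≤ tile.length
instance (tile : List Int) (xflip : Bool) (yflip : Bool) : Decidable (Pre_flip_tile tile xflip yflip) := by
  unfold Pre_flip_tile; infer_instance
def pvWitness_flip_tile : List Int × Bool × Bool :=
  (List.replicate 64 (0 : Int), true, false)

def Spec_flip_tile (tile : List Int) (xflip : Bool) (yflip : Bool) (out : List Int) : Prop := out = flip_tile_alt tile xflip yflip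
instance (tile : List Int) (xflip : Bool) (yflip : Bool) (out : List Int) : Decidable (Spec_flip_tile tile xflip yflip out) := by unfold Spec_flip_tile; infer_instance

-- ===== CLAIM (what is proved, stated in full; the proofs are below) =====
def Claim_equal_flip_tile : Prop := ∀ (tile : List Int) (xflip : Bool) (yflip : Bool), Dom_flip_tile tile xflip yflip → Pre_flip_tile tile xflip yflip → Spec_flip_tile tile xflip yflip (flip_tile tile xflip yflip)

-- ===== LEMMAS AND PROOFS =====
-- One row of A's output: the 8 reads tile[8y+0..8y+7] are exactly the row slice
-- (tile.drop (8y)).take 8 when the tile has at least 64 entries.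
theorem row_lemma (tile : List Int) (y : Int) (hy0 : 0 ≤ y) (hy : y < 8)
    (h64 : 64 ≤ tile.length) :
    (PySem.List.pyRange 0 8 1).map (fun x => PySem.List.pyGetD tile (8*y+x) 0)
      = (tile.drop (8*y).toNat).take 8 := by
  apply List.ext_getElem
  · simp [PySem.List.length_pyRange_one]
    omega
  · intro i h1 h2
    simp [PySem.List.length_pyRange_one] at h1 h2
    simp only [List.getElem_map, PySem.List.getElem_pyRange_one, List.getElem_take,
      List.getElem_drop]
    rw [PySem.List.pyGetD_eq_getElem tile (i := 8*y+(0+(i:Int))) 0 (by omega) (by omega)]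
    congr 1
    omega

-- Both programs produce the same rearrangement of the tile's 8 rows.
theorem flip_tile_eq_of_len (tile : List Int) (xflip yflip : Bool)
    (h64 : 64 ≤ tile.length) :
    flip_tile tile xflip yflip = flip_tile_alt tile xflip yflip := by
  have hr7 : PySem.List.pyRange 7 (-1) (-1) = [7,6,5,4,3,2,1,0] := by decide
  have hr8 : PySem.List.pyRange 0 8 1 = [0,1,2,3,4,5,6,7] := by decide
  have hrev : ∀ f : Int → Int, (PySem.List.pyRange 7 (-1) (-1)).map f
      = ((PySem.List.pyRange 0 8 1).map f).reverse := by
    intro f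
    rw [PySem.List.pyRange_neg_one_eq_reverse]
    norm_num [List.map_reverse]
  have hrow : ∀ y : Int, 0 ≤ y → y < 8 →
      (PySem.List.pyRange 0 8 1).map (fun x => PySem.List.pyGetD tile (8*y+x) 0)
        = (tile.drop (8*y).toNat).take 8 :=
    fun y a b => row_lemma tile y a b h64
  have h0 := hrow 0 (by norm_num) (by norm_num)
  have h1 := hrow 1 (by norm_num) (by norm_num)
  have h2 := hrow 2 (by norm_num) (by norm_num)
  have h3 := hrow 3 (by norm_num) (by norm_num)
  have h4 := hrow 4 (by norm_num) (by norm_num)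
  have h5 := hrow 5 (by norm_num) (by norm_num)
  have h6 := hrow 6 (by norm_num) (by norm_num)
  have h7 := hrow 7 (by norm_num) (by norm_num)
  have hrows : (((List.range 8).foldl (fun (st : List (List Int) × List Int) _ =>
      (st.1 ++ [st.2.take 8], st.2.drop 8)) ([], tile)).1)
      = [tile.take 8, (tile.drop 8).take 8, (tile.drop 16).take 8, (tile.drop 24).take 8,
         (tile.drop 32).take 8, (tile.drop 40).take 8, (tile.drop 48).take 8,
         (tile.drop 56).take 8] := by
    simp [show List.range 8 = [0,1,2,3,4,5,6,7] from rfl, List.drop_drop]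
  simp only [hr8] at h0 h1 h2 h3 h4 h5 h6 h7
  cases xflip <;> cases yflip
  · rfl
  · -- yflip only
    simp only [flip_tile, flip_tile_alt]
    simp only [hr7, hr8, List.flatMap_cons, List.flatMap_nil]
    simp only [h0, h1, h2, h3, h4, h5, h6, h7, hrows]
    simp [List.flatMap]
  · -- xflip only
    simp only [flip_tile, flip_tile_alt]
    simp only [hrev]
    simp only [hr7, hr8, List.flatMap_cons, List.flatMap_nil]
    simp only [h0, h1, h2, h3, h4, h5, h6, h7, hrows]
    simp [List.flatMap]
  · -- both flips
    simp only [flip_tile, flip_tile_alt]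
    simp only [hrev]
    simp only [hr7, hr8, List.flatMap_cons, List.flatMap_nil]
    simp only [h0, h1, h2, h3, h4, h5, h6, h7, hrows]
    simp [List.flatMap]

-- ===== VERDICT (by name: the statement is the Claim_ definition above) =====
theorem flip_tile_spec : Claim_equal_flip_tile := by
  intro tile xflip yflip _ hpre
  unfold Spec_flip_tile
  cases xflip <;> cases yflip
  · rfl
  · exact flip_tile_eq_of_len tile false true (hpre (Or.inr rfl))
  · exact flip_tile_eq_of_len tile true false (hpre (Or.inl rfl))
  · exact flip_tile_eq_of_len tile true true (hpre (Or.inl rfl))
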